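-- pv_equiv track=rewrite | github.com/Projet-INF101/ProjetINF101 | src/menus.py | scores_par_coup
-- ===== SOURCE A (Python) =====
-- from typing import Any, Dict, List, Optional, Tuple
--
-- def scores_par_coup(
--     scores: List[Dict[str, Any]]
-- ) -> Dict[int, List[Dict[str, Any]]]:
--     """
--     Classe les scores, en les groupant par nombre de coups.
--
--     # Paramètres
--
--     - scores : la liste des scores, non classés
--     """
--
--     # Les clés de ce dictionnaire sont les nombres de disques,
--     # et les valeurs les scores pour ce nombre de disques.
--     res = {}
--     for score in scores:
--         if score["disks"] in res:
--             res[score["disks"]].append(score)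
--         else:
--             res[score["disks"]] = [score]
--
--     for s in res:
--         res[s] = sorted(res[s], key=lambda s: s["n_turn"])
--
--     return res
-- ===== SOURCE B (Python) =====
-- def scores_par_coup(scores):
--     # Keys in first-occurrence order, then ONE grouping pass over the globally
--     # (stably) sorted list -- no per-group sorting.
--     res = {score["disks"]: [] for score in scores}
--     for score in sorted(scores, key=lambda s: s["n_turn"]):
--         res[score["disks"]].append(score)
--     return res
-- ===== Notes on version B (the rewrite author's own statement) =====
-- stated objective: alternative
-- what changed: A groups first and then sorts each group separately; B stably sorts the whole list once by n_turn and then groups it in a single pass (key order pre-seeded by a comprehension to keep first-occurrence order), so the per-group sorting loop disappears.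
import Mathlib
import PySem

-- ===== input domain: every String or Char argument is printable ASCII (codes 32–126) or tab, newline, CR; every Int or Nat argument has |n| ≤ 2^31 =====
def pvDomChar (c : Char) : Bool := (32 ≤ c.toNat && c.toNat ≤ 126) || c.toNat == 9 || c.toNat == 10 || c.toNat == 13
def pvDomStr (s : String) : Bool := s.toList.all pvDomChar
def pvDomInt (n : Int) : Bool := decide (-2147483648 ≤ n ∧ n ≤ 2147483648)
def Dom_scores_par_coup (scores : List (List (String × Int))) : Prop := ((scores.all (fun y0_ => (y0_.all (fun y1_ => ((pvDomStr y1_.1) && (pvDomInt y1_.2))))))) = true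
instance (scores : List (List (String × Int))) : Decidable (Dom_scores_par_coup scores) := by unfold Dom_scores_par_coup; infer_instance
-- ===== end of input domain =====

-- B replaces A's "group, then sort each group" by "stably sort once, then group in one pass"
-- (same cost class; alternative decomposition). Equal return value, key order included.


-- ===== PORT A =====
-- score["disks"] / score["n_turn"]: exact where the key is present (Pre_); Python raises KeyError otherwise.
def pvDisks (score : List (String × Int)) : Int := (PySem.Dict.ofList score).getD "disks" 0
def pvNTurn (score : List (String × Int)) : Int := (PySem.Dict.ofList score).getD "n_turn" 0

def scores_par_coup (scores : List (List (String × Int))) : List (Int × List (List (String × Int))) :=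
  let res := scores.foldl (fun res score =>
    if res.contains (pvDisks score) then
      res.modify (pvDisks score) [] (fun g => g ++ [score])   -- res[k].append(score)
    else
      res.insert (pvDisks score) [score]) PySem.Dict.empty
  let res2 := res.keys.foldl (fun r s =>
    r.insert s (PySem.List.sorted (r.getD s []) (fun t => pvNTurn t) false)) res
  res2.items

-- ===== PORT B =====
def scores_par_coup_alt (scores : List (List (String × Int))) : List (Int × List (List (String × Int))) :=
  let res := scores.foldl (fun d score => d.insert (pvDisks score) []) PySem.Dict.empty
  let res2 := (PySem.List.sorted scores (fun s => pvNTurn s) false).foldl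
    (fun d score => d.modify (pvDisks score) [] (fun g => g ++ [score])) res
  res2.items

-- ===== PRECONDITION & SPEC =====
-- A raises KeyError on any score missing the "disks" or "n_turn" key; exactly those inputs are excluded.
def Pre_scores_par_coup (scores : List (List (String × Int))) : Prop :=
  ∀ s ∈ scores, "disks" ∈ s.map Prod.fst ∧ "n_turn" ∈ s.map Prod.fst
instance (scores : List (List (String × Int))) : Decidable (Pre_scores_par_coup scores) := by unfold Pre_scores_par_coup; infer_instance
def pvWitness_scores_par_coup : (List (List (String × Int))) :=
  [[("disks", 3), ("n_turn", 5)], [("disks", 4), ("n_turn", 2)], [("disks", 3), ("n_turn", 2)]]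

def Spec_scores_par_coup (scores : List (List (String × Int))) (out : List (Int × List (List (String × Int)))) : Prop := out = scores_par_coup_alt scores
instance (scores : List (List (String × Int))) (out : List (Int × List (List (String × Int)))) : Decidable (Spec_scores_par_coup scores out) := by unfold Spec_scores_par_coup; infer_instance

-- ===== CLAIM (what is proved, stated in full; the proofs are below) =====
def Claim_equal_scores_par_coup : Prop := ∀ (scores : List (List (String × Int))), Dom_scores_par_coup scores → Pre_scores_par_coup scores → Spec_scores_par_coup scores (scores_par_coup scores)

-- ===== LEMMAS AND PROOFS =====

-- sorting-side lemmas (generic)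
theorem pv_insertBy_cons_of_forall {α : Type} (bef : α → α → Bool) (x : α) (zs : List α)
    (h : ∀ z ∈ zs, bef x z = true) : PySem.List.insertBy bef x zs = x :: zs := by
  cases zs with
  | nil => simp [PySem.List.insertBy]
  | cons z zs => simp [PySem.List.insertBy, h z (by simp)]

theorem pv_pairwise_insertBy {α : Type} (nk : α → Int) (x : α) (ys : List α)
    (h : ys.Pairwise (fun a b => nk a ≤ nk b)) :
    (PySem.List.insertBy (fun a b => decide (nk a < nk b)) x ys).Pairwise (fun a b => nk a ≤ nk b) := by
  induction ys with
  | nil => simp [PySem.List.insertBy]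
  | cons y ys ih =>
    rcases List.pairwise_cons.mp h with ⟨hy, hys⟩
    by_cases hxy : nk x < nk y
    · simp only [PySem.List.insertBy, hxy, decide_true, if_true]
      refine List.pairwise_cons.mpr ⟨?_, h⟩
      intro z hz
      rcases List.mem_cons.mp hz with rfl | hz
      · exact le_of_lt hxy
      · exact le_trans (le_of_lt hxy) (hy z hz)
    · simp only [PySem.List.insertBy, hxy, decide_false, Bool.false_eq_true, if_false]
      refine List.pairwise_cons.mpr ⟨?_, ih hys⟩
      intro z hz
      rcases (PySem.List.mem_insertBy _ _ _ _).mp hz with rfl | hz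
      · exact le_of_not_gt hxy
      · exact hy z hz

theorem pv_filter_insertBy {α : Type} (nk : α → Int) (p : α → Bool) (x : α) (ys : List α)
    (h : ys.Pairwise (fun a b => nk a ≤ nk b)) :
    (PySem.List.insertBy (fun a b => decide (nk a < nk b)) x ys).filter p =
      if p x then PySem.List.insertBy (fun a b => decide (nk a < nk b)) x (ys.filter p)
      else ys.filter p := by
  induction ys with
  | nil => by_cases hx : p x <;> simp [PySem.List.insertBy, hx]
  | cons y ys ih =>
    rcases List.pairwise_cons.mp h with ⟨hy, hys⟩
    by_cases hxy : nk x < nk y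
    · simp only [PySem.List.insertBy, hxy, decide_true, if_true]
      by_cases hx : p x
      · by_cases hpy : p y
        · simp [hx, hpy, PySem.List.insertBy, hxy]
        · simp only [List.filter_cons, hx, hpy, if_true, if_false, Bool.false_eq_true]
          rw [pv_insertBy_cons_of_forall]
          intro z hz
          have hzy : z ∈ ys := List.mem_of_mem_filter hz
          simpa using lt_of_lt_of_le hxy (hy z hzy)
      · by_cases hpy : p y <;> simp [hx, hpy]
    · simp only [PySem.List.insertBy, hxy, decide_false, Bool.false_eq_true, if_false]
      by_cases hpy : p y
      · simp only [List.filter_cons, hpy, if_true]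
        rw [ih hys]
        by_cases hx : p x
        · simp only [hx, if_true]
          simp [PySem.List.insertBy, hxy]
        · simp [hx]
      · simp only [List.filter_cons, hpy, Bool.false_eq_true, if_false]
        exact ih hys

theorem pv_foldl_insertBy_filter {α : Type} (nk : α → Int) (p : α → Bool) :
    ∀ (xs acc : List α), acc.Pairwise (fun a b => nk a ≤ nk b) →
    (xs.foldl (fun acc x => PySem.List.insertBy (fun a b => decide (nk a < nk b)) x acc) acc).filter p =
      (xs.filter p).foldl (fun acc x => PySem.List.insertBy (fun a b => decide (nk a < nk b)) x acc)
        (acc.filter p) := by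
  intro xs
  induction xs with
  | nil => intro acc _; simp
  | cons x xs ih =>
    intro acc hacc
    simp only [List.foldl_cons, List.filter_cons]
    rw [ih _ (pv_pairwise_insertBy nk x acc hacc), pv_filter_insertBy nk p x acc hacc]
    by_cases hx : p x <;> simp [hx]

theorem pv_sorted_filter {α : Type} (nk : α → Int) (p : α → Bool) (xs : List α) :
    (PySem.List.sorted xs nk false).filter p = PySem.List.sorted (xs.filter p) nk false := by
  rw [PySem.List.sorted_eq_foldl_insertBy xs nk, PySem.List.sorted_eq_foldl_insertBy (xs.filter p) nk]
  simpa using pv_foldl_insertBy_filter nk p xs [] List.Pairwise.nil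

-- dict-side lemmas
theorem pv_stepA_eq (d : PySem.Dict Int (List (List (String × Int)))) (s : List (String × Int)) :
    (if d.contains (pvDisks s) then d.modify (pvDisks s) [] (fun g => g ++ [s])
     else d.insert (pvDisks s) [s]) = d.modify (pvDisks s) [] (fun g => g ++ [s]) := by
  by_cases h : d.contains (pvDisks s) = true
  · simp [h]
  · have h' : d.contains (pvDisks s) = false := by simpa using h
    simp [h', PySem.Dict.modify, PySem.Dict.getD_of_not_contains]

theorem pv_groupfold_getD (scores : List (List (String × Int)))
    (d : PySem.Dict Int (List (List (String × Int)))) (c : Int) :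
    (scores.foldl (fun d s => d.modify (pvDisks s) [] (fun g => g ++ [s])) d).getD c [] =
      d.getD c [] ++ scores.filter (fun s => pvDisks s == c) := by
  have h := PySem.Dict.getD_foldl_modify_append
      (scores.map (fun s => ((pvDisks s : Int), s))) d c
  rw [List.foldl_map] at h
  simp only at h
  rw [h]
  congr 1
  rw [List.filter_map, List.map_map]
  simp [Function.comp_def]

theorem pv_sortfold_getD (ks : List Int) (hnd : ks.Nodup) :
    ∀ (d : PySem.Dict Int (List (List (String × Int)))) (c : Int),
    (ks.foldl (fun r s => r.insert s (PySem.List.sorted (r.getD s []) (fun t => pvNTurn t) false)) d).getD c [] =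
      if c ∈ ks then PySem.List.sorted (d.getD c []) (fun t => pvNTurn t) false else d.getD c [] := by
  induction ks with
  | nil => intro d c; simp
  | cons k ks ih =>
    intro d c
    rcases List.nodup_cons.mp hnd with ⟨hk, hks⟩
    simp only [List.foldl_cons]
    rw [ih hks]
    by_cases hck : c = k
    · subst hck
      have hcks : c ∉ ks := hk
      simp [hcks]
    · by_cases hcks : c ∈ ks
      · simp [hcks, hck, PySem.Dict.getD_insert]
      · simp [hcks, hck, PySem.Dict.getD_insert]

theorem pv_seedfold_getD (xs : List (List (String × Int))) :
    ∀ (d : PySem.Dict Int (List (List (String × Int)))),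
    (∀ c, d.getD c [] = []) → ∀ c,
    (xs.foldl (fun d s => d.insert (pvDisks s) ([] : List (List (String × Int)))) d).getD c [] = [] := by
  induction xs with
  | nil => intro d h c; simpa using h c
  | cons x xs ih =>
    intro d h c
    simp only [List.foldl_cons]
    refine ih _ ?_ c
    intro c'
    rw [PySem.Dict.getD_insert]
    split_ifs with h'
    · rfl
    · exact h c'

theorem pv_set_update_of_mem {α : Type} [BEq α] [LawfulBEq α] (s : PySem.Set α) (xs : List α)
    (h : ∀ x ∈ xs, x ∈ s) : PySem.Set.update s xs = s := by
  rw [PySem.Set.update_eq_append_filter]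
  have hnil : (PySem.Set.ofList xs).filter (fun y => !s.contains y) = [] := by
    apply List.filter_eq_nil_iff.mpr
    intro y hy
    have hmem : y ∈ xs := (PySem.Set.mem_ofList xs y).mp hy
    simp [PySem.Set.contains, h y hmem]
  rw [hnil, List.append_nil]

-- ===== VERDICT (by name: the statement is the Claim_ definition above) =====
theorem scores_par_coup_spec : Claim_equal_scores_par_coup := by
  intro scores _ _
  unfold Spec_scores_par_coup scores_par_coup scores_par_coup_alt
  -- rewrite A's branching first loop into the uniform modify-fold
  have hstep : (fun (res : PySem.Dict Int (List (List (String × Int)))) score =>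
      if res.contains (pvDisks score) then res.modify (pvDisks score) [] (fun g => g ++ [score])
      else res.insert (pvDisks score) [score]) =
      (fun res score => res.modify (pvDisks score) [] (fun g => g ++ [score])) := by
    funext d s; exact pv_stepA_eq d s
  rw [hstep]
  set KA : PySem.Dict Int (List (List (String × Int))) :=
    scores.foldl (fun d s => d.modify (pvDisks s) [] (fun g => g ++ [s])) PySem.Dict.empty with hKA
  set B0 : PySem.Dict Int (List (List (String × Int))) :=
    scores.foldl (fun d s => d.insert (pvDisks s) []) PySem.Dict.empty with hB0
  set AF : PySem.Dict Int (List (List (String × Int))) :=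
    KA.keys.foldl (fun r s => r.insert s (PySem.List.sorted (r.getD s []) (fun t => pvNTurn t) false)) KA with hAF
  set BF : PySem.Dict Int (List (List (String × Int))) :=
    (PySem.List.sorted scores (fun s => pvNTurn s) false).foldl
      (fun d s => d.modify (pvDisks s) [] (fun g => g ++ [s])) B0 with hBF
  -- keys
  have hKAkeys : KA.keys = PySem.Set.update ([] : PySem.Set Int) (scores.map pvDisks) := by
    rw [hKA, PySem.Dict.keys_foldl_modify_key scores pvDisks [] (fun _ s => fun g => g ++ [s])]
    simp [PySem.Dict.keys_empty]
  have hB0keys : B0.keys = PySem.Set.update ([] : PySem.Set Int) (scores.map pvDisks) := by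
    rw [hB0, PySem.Dict.keys_foldl_insert_key scores pvDisks (fun _ _ => [])]
    simp [PySem.Dict.keys_empty]
  have hKAnd : KA.keys.Nodup := by
    rw [hKA]
    exact PySem.Dict.nodup_keys_foldl_modify_key scores pvDisks [] _ _ PySem.Dict.nodup_keys_empty
  have hAFkeys : AF.keys = KA.keys := by
    rw [hAF, PySem.Dict.keys_foldl_insert KA.keys _ KA]
    exact pv_set_update_of_mem KA.keys KA.keys (fun x hx => hx)
  have hBFkeys : BF.keys = B0.keys := by
    rw [hBF, PySem.Dict.keys_foldl_modify_key _ pvDisks [] (fun _ s => fun g => g ++ [s]) B0]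
    apply pv_set_update_of_mem
    intro x hx
    rcases List.mem_map.mp hx with ⟨s, hs, rfl⟩
    have hs' : s ∈ scores := (PySem.List.mem_sorted scores _ false s).mp hs
    rw [hB0keys]
    have : PySem.Set.update ([] : PySem.Set Int) (scores.map pvDisks) =
        PySem.Set.ofList (scores.map pvDisks) := rfl
    rw [this]
    exact (PySem.Set.mem_ofList _ _).mpr (List.mem_map_of_mem hs')
  have hkeys : AF.keys = BF.keys := by rw [hAFkeys, hBFkeys, hKAkeys, hB0keys]
  have hB0nd : B0.keys.Nodup := by
    rw [hB0]
    exact PySem.Dict.nodup_keys_foldl_insert_key scores pvDisks _ _ PySem.Dict.nodup_keys_empty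
  -- values at each surviving key
  have hvals : ∀ k ∈ AF.keys, AF.getD k [] = BF.getD k [] := by
    intro k hk
    have hkKA : k ∈ KA.keys := by rwa [hAFkeys] at hk
    have hA : AF.getD k [] =
        PySem.List.sorted (scores.filter (fun s => pvDisks s == k)) (fun t => pvNTurn t) false := by
      rw [hAF, pv_sortfold_getD KA.keys hKAnd KA k]
      rw [if_pos hkKA, hKA, pv_groupfold_getD scores PySem.Dict.empty k]
      simp [PySem.Dict.getD_empty]
    have hB : BF.getD k [] =
        (PySem.List.sorted scores (fun s => pvNTurn s) false).filter (fun s => pvDisks s == k) := by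
      rw [hBF, pv_groupfold_getD _ B0 k]
      rw [pv_seedfold_getD scores PySem.Dict.empty (fun c => PySem.Dict.getD_empty c []) k]
      simp
    rw [hA, hB, pv_sorted_filter (fun t => pvNTurn t) (fun s => pvDisks s == k) scores]
  -- items
  rw [PySem.Dict.items_eq_map_keys AF (hAFkeys ▸ hKAnd) [],
      PySem.Dict.items_eq_map_keys BF (hBFkeys ▸ hB0nd) [], ← hkeys]
  apply List.map_congr_left
  intro k hk
  rw [hvals k hk]
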